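-- pv_equiv track=rewrite | github.com/TardyNoe/Text-over-sound-Python | Emetteur.py | bin_vers_txt
-- ===== SOURCE A (Python) =====
-- def bin_vers_txt(binary): #Converti un caractère binaire vers texte.
--     binary1 = binary
--     decimal, i, n = 0, 0, 0
--     while(binary != 0):
--         dec = binary % 10
--         decimal = decimal + dec * pow(2, i)
--         binary = binary//10
--         i += 1
--     return(chr(decimal))
-- ===== SOURCE B (Python) =====
-- def bin_vers_txt(binary):  # Converti un caractere binaire vers texte.
--     decimal = 0
--     for ch in str(binary):
--         decimal = decimal * 2 + (ord(ch) - 48)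
--     return chr(decimal)
-- ===== Notes on version B (the rewrite author's own statement) =====
-- stated objective: idiomatic
-- what changed: B reads the decimal digits most-significant-first from str(binary) and accumulates Horner-style (d = d*2 + digit), instead of A's least-significant-first arithmetic peeling with a pow(2, i) weight per iteration; Pre_ excludes negative inputs, on which A loops forever (binary//10 never reaches 0) while B raises ValueError from chr.
import Mathlib
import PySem

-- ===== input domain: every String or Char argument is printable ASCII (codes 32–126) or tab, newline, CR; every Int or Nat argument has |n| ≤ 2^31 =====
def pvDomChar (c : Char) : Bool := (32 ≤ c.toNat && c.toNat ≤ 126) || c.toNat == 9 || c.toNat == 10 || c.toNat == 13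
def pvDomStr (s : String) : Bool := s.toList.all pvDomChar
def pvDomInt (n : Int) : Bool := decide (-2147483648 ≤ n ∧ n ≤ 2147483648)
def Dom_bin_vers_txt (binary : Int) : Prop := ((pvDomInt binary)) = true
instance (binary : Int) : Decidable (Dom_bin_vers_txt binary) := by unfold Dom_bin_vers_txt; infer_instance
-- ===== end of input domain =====

-- B reads the decimal digits most-significant-first from str(binary) via Horner's rule
-- (decimal = decimal*2 + digit) instead of A's LSB-first peeling with pow(2, i); Pre_
-- excludes negative inputs, on which A's while loop never terminates.


-- ===== PORT A =====
-- The while loop of A as fuel recursion; natAbs binary + 1 iterations always suffice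
-- for the nonnegative inputs admitted by Pre_ (the loop stops as soon as binary = 0).
def binVersTxtLoopA (fuel : Nat) (binary decimal : Int) (i : Nat) : Int :=
  match fuel with
  | 0 => decimal
  | f + 1 =>
    if binary = 0 then decimal
    else binVersTxtLoopA f (PySem.Int.floordiv binary 10)
          (decimal + (PySem.Int.mod binary 10) * 2 ^ i) (i + 1)

def bin_vers_txt (binary : Int) : String :=
  String.ofList [Char.ofNat (binVersTxtLoopA (binary.natAbs + 1) binary 0 0).toNat]

-- ===== PORT B =====
def bin_vers_txt_alt (binary : Int) : String :=
  let decimal := (PySem.Int.toChars binary).foldl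
      (fun d ch => d * 2 + ((ch.toNat : Int) - 48)) 0
  String.ofList [Char.ofNat decimal.toNat]

-- ===== PRECONDITION & SPEC =====
-- Pre_ excludes negative inputs: there A's while loop never terminates (binary//10
-- stays at -1 forever), so A returns on exactly the nonnegative ints.
def Pre_bin_vers_txt (binary : Int) : Prop := 0 ≤ binary
instance (binary : Int) : Decidable (Pre_bin_vers_txt binary) := by unfold Pre_bin_vers_txt; infer_instance
def pvWitness_bin_vers_txt : Int := (1000001)

def Spec_bin_vers_txt (binary : Int) (out : String) : Prop := out = bin_vers_txt_alt binary
instance (binary : Int) (out : String) : Decidable (Spec_bin_vers_txt binary out) := by unfold Spec_bin_vers_txt; infer_instance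

-- ===== CLAIM (what is proved, stated in full; the proofs are below) =====
def Claim_equal_bin_vers_txt : Prop := ∀ (binary : Int), Dom_bin_vers_txt binary → Pre_bin_vers_txt binary → Spec_bin_vers_txt binary (bin_vers_txt binary)

-- ===== LEMMAS AND PROOFS =====

-- The common value: the decimal digits of n read as base-2 weights.
def pvVal (n : Nat) : Int :=
  if n = 0 then 0 else pvVal (n / 10) * 2 + (n % 10 : Int)
decreasing_by exact Nat.div_lt_self (Nat.pos_of_ne_zero (by assumption)) (by omega)

-- MSB-first decimal digit characters of n.
def pvDecChars (n : Nat) : List Char :=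
  if n < 10 then [Nat.digitChar n]
  else pvDecChars (n / 10) ++ [Nat.digitChar (n % 10)]
decreasing_by exact Nat.div_lt_self (by omega) (by omega)

theorem pvVal_zero : pvVal 0 = 0 := by rw [pvVal]; simp

theorem pvVal_ne (n : Nat) (hn : n ≠ 0) :
    pvVal n = pvVal (n / 10) * 2 + (n % 10 : Int) := by
  conv_lhs => rw [pvVal]
  rw [if_neg hn]

theorem pvDecChars_lt (n : Nat) (h : n < 10) : pvDecChars n = [Nat.digitChar n] := by
  conv_lhs => rw [pvDecChars]
  rw [if_pos h]

theorem pvDecChars_ge (n : Nat) (h : ¬ n < 10) :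
    pvDecChars n = pvDecChars (n / 10) ++ [Nat.digitChar (n % 10)] := by
  conv_lhs => rw [pvDecChars]
  rw [if_neg h]

theorem pvLoopA_eq (f : Nat) : ∀ (n : Nat) (decimal : Int) (i : Nat), n < f →
    binVersTxtLoopA f (n : Int) decimal i = decimal + pvVal n * 2 ^ i := by
  induction f with
  | zero => intro n _ _ h; omega
  | succ f ih =>
    intro n decimal i h
    by_cases hn : n = 0
    · subst hn
      simp [binVersTxtLoopA, pvVal_zero]
    · have h0 : ((n : Int)) ≠ 0 := by exact_mod_cast hn
      have hd : PySem.Int.floordiv (n : Int) 10 = ((n / 10 : Nat) : Int) := by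
        simp [PySem.Int.floordiv, Int.fdiv_eq_ediv]
      have hm : PySem.Int.mod (n : Int) 10 = ((n % 10 : Nat) : Int) := by
        simp [PySem.Int.mod, Int.fmod_eq_emod]
      rw [binVersTxtLoopA, if_neg h0, hd, hm,
        ih (n / 10) _ (i + 1) (by omega), pvVal_ne n hn]
      push_cast
      ring

theorem pvToDigitsCore_acc (b : Nat) (f : Nat) : ∀ (n : Nat) (l : List Char),
    Nat.toDigitsCore b f n l = Nat.toDigitsCore b f n [] ++ l := by
  induction f with
  | zero => intro n l; simp [Nat.toDigitsCore]
  | succ f ih =>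
    intro n l
    simp only [Nat.toDigitsCore]
    by_cases h : n / b = 0
    · simp [h]
    · rw [if_neg h, if_neg h, ih (n / b) (Nat.digitChar (n % b) :: l),
        ih (n / b) [Nat.digitChar (n % b)]]
      simp

theorem pvToDigitsCore_eq (f : Nat) : ∀ (n : Nat), n < f →
    Nat.toDigitsCore 10 f n [] = pvDecChars n := by
  induction f with
  | zero => intro n h; omega
  | succ f ih =>
    intro n h
    rw [Nat.toDigitsCore]
    by_cases h10 : n < 10
    · have hd : n / 10 = 0 := Nat.div_eq_of_lt h10
      rw [if_pos hd, pvDecChars_lt n h10, Nat.mod_eq_of_lt h10]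
    · have hd : n / 10 ≠ 0 := by omega
      rw [if_neg hd, pvToDigitsCore_acc, ih (n / 10) (by omega),
        pvDecChars_ge n h10]

theorem pvToDigits_eq (n : Nat) : Nat.toDigits 10 n = pvDecChars n := by
  rw [Nat.toDigits]
  exact pvToDigitsCore_eq (n + 1) n (by omega)

theorem pvDigitChar_val (d : Nat) (h : d < 10) :
    ((Nat.digitChar d).toNat : Int) - 48 = (d : Int) := by
  interval_cases d <;> decide

theorem pvFoldl_decChars (n : Nat) :
    (pvDecChars n).foldl (fun d ch => d * 2 + ((ch.toNat : Int) - 48)) 0 = pvVal n := by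
  suffices H : ∀ (a : Int),
      (pvDecChars n).foldl (fun d ch => d * 2 + ((ch.toNat : Int) - 48)) a
        = a * 2 ^ (pvDecChars n).length + pvVal n by
    simpa using H 0
  induction n using Nat.strong_induction_on with
  | _ n ih =>
    intro a
    by_cases h10 : n < 10
    · rw [pvDecChars_lt n h10]
      simp only [List.foldl_cons, List.foldl_nil, List.length_singleton,
        pvDigitChar_val n h10, pow_one]
      by_cases hn : n = 0
      · subst hn; simp [pvVal_zero]
      · rw [pvVal_ne n hn, Nat.div_eq_of_lt h10, pvVal_zero]
        push_cast
        omega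
    · rw [pvDecChars_ge n h10, List.foldl_append,
        ih (n / 10) (Nat.div_lt_self (by omega) (by omega)) a]
      simp only [List.foldl_cons, List.foldl_nil, List.length_append,
        List.length_singleton, pvDigitChar_val (n % 10) (Nat.mod_lt n (by omega))]
      rw [pvVal_ne n (by omega)]
      push_cast
      ring

-- ===== VERDICT (by name: the statement is the Claim_ definition above) =====
theorem bin_vers_txt_spec : Claim_equal_bin_vers_txt := by
  intro binary _ hpre
  unfold Spec_bin_vers_txt bin_vers_txt bin_vers_txt_alt
  obtain ⟨n, rfl⟩ : ∃ n : Nat, binary = (n : Int) :=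
    ⟨binary.toNat, (Int.toNat_of_nonneg hpre).symm⟩
  have hA : binVersTxtLoopA ((n : Int).natAbs + 1) (n : Int) 0 0 = pvVal n := by
    rw [Int.natAbs_natCast, pvLoopA_eq (n + 1) n 0 0 (by omega)]
    simp
  have hB : (PySem.Int.toChars (n : Int)).foldl
      (fun d ch => d * 2 + ((ch.toNat : Int) - 48)) 0 = pvVal n := by
    have hneg : ¬ ((n : Int) < 0) := by exact_mod_cast Int.natCast_nonneg n |>.not_gt
    simp only [PySem.Int.toChars, if_neg hneg, Int.toNat_natCast]
    rw [pvToDigits_eq, pvFoldl_decChars]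
  rw [hA, hB]
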